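-- pv_equiv track=rewrite | github.com/nummer1/PU2IntelliJ | Database/insertRows.py | makeSQLSingle
-- ===== SOURCE A (Python) =====
-- def makeSQLSingle(arg):
--     retVal = ''
--     if arg is None:
--         newArg = "NULL"
--     elif type(arg) == type(""):
--         newArg = []
--         for char in arg:
--             if char in ["\'", "\"", "\\"]:
--                 newArg.append('\\' + char)
--             else:
--                 newArg.append(char)
--         newArg = "\'" + ''.join(newArg) + "\'"
--     if newArg is not None:
--         retVal = newArg
--     else:
--         retVal = arg
--     return retVal
-- ===== SOURCE B (Python) =====
-- def makeSQLSingle(arg):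
--     if arg is None:
--         newArg = "NULL"
--     elif type(arg) == type(""):
--         newArg = "'" + arg.replace('\\', '\\\\').replace("'", "\\'").replace('"', '\\"') + "'"
--     return newArg
-- ===== Notes on version B (the rewrite author's own statement) =====
-- stated objective: idiomatic
-- what changed: Replaces the per-character list-building loop plus join with a chained str.replace (backslash first, then each quote) and drops the retVal/dead-else scaffolding.
import Mathlib
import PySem

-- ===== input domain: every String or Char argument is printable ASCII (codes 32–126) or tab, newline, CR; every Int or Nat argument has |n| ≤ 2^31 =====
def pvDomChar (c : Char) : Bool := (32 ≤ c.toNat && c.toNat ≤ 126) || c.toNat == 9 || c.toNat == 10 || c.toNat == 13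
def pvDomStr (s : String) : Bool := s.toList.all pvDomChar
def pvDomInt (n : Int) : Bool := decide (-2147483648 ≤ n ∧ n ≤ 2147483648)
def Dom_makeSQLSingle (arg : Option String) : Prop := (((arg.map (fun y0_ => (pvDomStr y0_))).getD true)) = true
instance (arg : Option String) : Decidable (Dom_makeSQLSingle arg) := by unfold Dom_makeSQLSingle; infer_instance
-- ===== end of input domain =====

-- B replaces A's per-character list-building loop + ''.join with a chained str.replace (backslash first); idiomatic, same O(n) cost.

-- ===== PORT A =====
def makeSQLSingle (arg : Option String) : String :=
  -- retVal = ''  (overwritten below; with arg : Option String, newArg is always assigned)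
  match arg with
  | none => "NULL"
  | some s =>
      -- newArg = []; for char in arg: append '\' + char if char in ['\'','"','\\'] else char
      let pieces : List String := s.toList.foldl
        (fun acc c =>
          if c = '\'' ∨ c = '"' ∨ c = '\\' then acc ++ [String.ofList ['\\', c]]
          else acc ++ [String.ofList [c]]) []
      -- newArg = "'" + ''.join(newArg) + "'";  retVal = newArg
      "'" ++ PySem.Str.join "" pieces ++ "'"

-- ===== PORT B =====
def makeSQLSingle_alt (arg : Option String) : String :=
  match arg with
  | none => "NULL"
  | some s =>
      "'" ++ PySem.Str.replace (PySem.Str.replace (PySem.Str.replace s "\\" "\\\\") "'" "\\'") "\"" "\\\"" ++ "'"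

-- ===== PRECONDITION & SPEC =====
def Spec_makeSQLSingle (arg : Option String) (out : String) : Prop := out = makeSQLSingle_alt arg
instance (arg : Option String) (out : String) : Decidable (Spec_makeSQLSingle arg out) := by unfold Spec_makeSQLSingle; infer_instance

-- ===== CLAIM (what is proved, stated in full; the proofs are below) =====
def Claim_equal_makeSQLSingle : Prop := ∀ (arg : Option String), Dom_makeSQLSingle arg → Spec_makeSQLSingle arg (makeSQLSingle arg)

-- ===== LEMMAS AND PROOFS =====

-- replacing a single-character pattern is a character-wise flatMap
theorem replace_go_single (o : Char) (new : List Char) :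
    ∀ (fuel : Nat) (l acc : List Char), l.length ≤ fuel →
    PySem.Chars.replace.go [o] new fuel l acc =
      acc.reverse ++ l.flatMap (fun c => if c = o then new else [c]) := by
  intro fuel
  induction fuel with
  | zero =>
      intro l acc h
      have : l = [] := List.length_eq_zero_iff.mp (Nat.le_zero.mp h)
      subst this
      simp [PySem.Chars.replace.go]
  | succ n ih =>
      intro l acc h
      cases l with
      | nil => simp [PySem.Chars.replace.go]
      | cons c t =>
          by_cases hc : c = o
          · rw [show PySem.Chars.replace.go [o] new (n+1) (c :: t) acc
                  = PySem.Chars.replace.go [o] new n t (new.reverse ++ acc) by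
                simp [PySem.Chars.replace.go, List.isPrefixOf, hc]]
            rw [ih t (new.reverse ++ acc) (by simpa using Nat.succ_le_succ_iff.mp h)]
            simp [hc]
          · rw [show PySem.Chars.replace.go [o] new (n+1) (c :: t) acc
                  = PySem.Chars.replace.go [o] new n t (c :: acc) by
                simp [PySem.Chars.replace.go, List.isPrefixOf, Ne.symm hc]]
            rw [ih t (c :: acc) (by simpa using Nat.succ_le_succ_iff.mp h)]
            simp [hc]

theorem replace_single (s : List Char) (o : Char) (new : List Char) :
    PySem.Chars.replace s [o] new = s.flatMap (fun c => if c = o then new else [c]) := by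
  rw [PySem.Chars.replace, if_neg (by simp)]
  exact replace_go_single o new s.length s [] le_rfl

-- A's loop builds, piece by piece, the per-character escapes
theorem foldl_pieces (s : List Char) (init : List String) :
    s.foldl (fun acc c =>
        if c = '\'' ∨ c = '"' ∨ c = '\\' then acc ++ [String.ofList ['\\', c]]
        else acc ++ [String.ofList [c]]) init
      = init ++ s.map (fun c =>
          if c = '\'' ∨ c = '"' ∨ c = '\\' then String.ofList ['\\', c] else String.ofList [c]) := by
  induction s generalizing init with
  | nil => simp
  | cons c t ih =>
      by_cases hc : c = '\'' ∨ c = '"' ∨ c = '\\' <;>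
        simp [List.foldl_cons, hc, ih]

theorem core_eq (s : List Char) :
    s.flatMap (fun c => if c = '\'' ∨ c = '"' ∨ c = '\\' then ['\\', c] else [c])
      = ((s.flatMap (fun c => if c = '\\' then ['\\', '\\'] else [c])).flatMap
          (fun c => if c = '\'' then ['\\', '\''] else [c])).flatMap
          (fun c => if c = '"' then ['\\', '"'] else [c]) := by
  induction s with
  | nil => simp
  | cons c t ih =>
      by_cases h1 : c = '\\'
      · simp [h1, ih]
      · by_cases h2 : c = '\''
        · simp [h1, h2, ih]
        · by_cases h3 : c = '"'
          · simp [h1, h2, h3, ih]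
          · simp [h1, h2, h3, ih]

theorem flatten_intersperse_nil (l : List (List Char)) :
    (List.intersperse ([] : List Char) l).flatten = l.flatten := by
  induction l with
  | nil => rfl
  | cons a t ih =>
      cases t with
      | nil => rfl
      | cons b u => simp [List.intersperse_cons₂] at ih ⊢; simpa using ih

-- ===== VERDICT (by name: the statement is the Claim_ definition above) =====
theorem makeSQLSingle_spec : Claim_equal_makeSQLSingle := by
  intro arg _
  unfold Spec_makeSQLSingle makeSQLSingle makeSQLSingle_alt
  cases arg with
  | none => rfl
  | some s =>
      simp only [PySem.Str.replace, PySem.Str.join]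
      apply String.toList_injective
      simp only [String.toList_append, String.toList_ofList]
      rw [foldl_pieces]
      simp only [List.nil_append, PySem.Chars.join, String.toList_empty, List.intercalate,
        flatten_intersperse_nil, List.map_map]
      rw [show (String.toList ∘ fun c =>
            if c = '\'' ∨ c = '"' ∨ c = '\\' then String.ofList ['\\', c] else String.ofList [c])
          = fun c => if c = '\'' ∨ c = '"' ∨ c = '\\' then ['\\', c] else [c] from
        funext fun c => by by_cases h : c = '\'' ∨ c = '"' ∨ c = '\\' <;> simp [h]]
      rw [List.flatten_eq_flatMap, List.flatMap_map]
      simp only [id]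
      rw [core_eq s.toList]
      simp [replace_single]
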